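-- pv_equiv track=rewrite | github.com/nestor98/pymidi2vid | editor.py | maxSymNotes
-- ===== SOURCE A (Python) =====
-- def maxSymNotes(notes):
--     curr = max = 0
--     for note in notes:
--         if note[2] == 0:
--             curr+=1
--             if curr > max:
--                 max = curr
--         else:
--             curr = 0
--     return max
-- ===== SOURCE B (Python) =====
-- def maxSymNotes(notes):
--     best = 0
--     i = 0
--     n = len(notes)
--     while i < n:
--         if notes[i][2] == 0:
--             j = i + 1
--             while j < n and notes[j][2] == 0:
--                 j += 1
--             if j - i > best:
--                 best = j - i
--             i = j
--         else:
--             i += 1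
--     return best
-- ===== Notes on version B (the rewrite author's own statement) =====
-- stated objective: alternative
-- what changed: Replaces the running-counter-with-reset single pass by a run-scanning loop: at each zero-flag note it scans the whole maximal zero run at once, records its length, and jumps past it.
import Mathlib
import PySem

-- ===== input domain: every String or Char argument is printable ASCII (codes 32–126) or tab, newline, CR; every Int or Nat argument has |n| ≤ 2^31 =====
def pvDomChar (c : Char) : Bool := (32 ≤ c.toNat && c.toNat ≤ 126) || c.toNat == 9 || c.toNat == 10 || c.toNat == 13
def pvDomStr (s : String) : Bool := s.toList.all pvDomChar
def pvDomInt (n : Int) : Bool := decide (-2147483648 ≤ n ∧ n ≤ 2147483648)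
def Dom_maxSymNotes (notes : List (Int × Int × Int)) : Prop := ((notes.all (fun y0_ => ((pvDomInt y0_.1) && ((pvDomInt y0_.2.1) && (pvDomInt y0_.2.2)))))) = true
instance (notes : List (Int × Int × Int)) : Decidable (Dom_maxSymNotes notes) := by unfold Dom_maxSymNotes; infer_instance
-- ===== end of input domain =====

-- B replaces A's running-counter-with-reset pass by a run-scanning loop (scan each
-- maximal zero-flag run at once and jump past it); objective: alternative, same cost.


-- ===== PORT A =====
-- curr = max = 0; for note in notes: …; return max
def maxSymNotes (notes : List (Int × Int × Int)) : Int :=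
  (notes.foldl
    (fun (st : Int × Int) note =>
      if note.2.2 = 0 then
        let curr := st.1 + 1
        (curr, if curr > st.2 then curr else st.2)
      else
        (0, st.2))
    (0, 0)).2

-- ===== PORT B =====
-- inner while loop: number of leading zero-flag notes (j - i - 1 past the first one)
def pvCountZeros (l : List (Int × Int × Int)) : Nat :=
  match l with
  | [] => 0
  | n :: t => if n.2.2 = 0 then 1 + pvCountZeros t else 0

-- outer while loop over the remaining suffix, carrying best
def pvScanRuns (l : List (Int × Int × Int)) (best : Int) : Int :=
  match l with
  | [] => best
  | n :: t =>
    if n.2.2 = 0 then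
      let c : Int := 1 + (pvCountZeros t : Int)
      pvScanRuns (t.drop (pvCountZeros t)) (if c > best then c else best)
    else
      pvScanRuns t best
termination_by l.length
decreasing_by
  all_goals simp [List.length_drop]

def maxSymNotes_alt (notes : List (Int × Int × Int)) : Int :=
  pvScanRuns notes 0

-- ===== PRECONDITION & SPEC =====
def Spec_maxSymNotes (notes : List (Int × Int × Int)) (out : Int) : Prop := out = maxSymNotes_alt notes
instance (notes : List (Int × Int × Int)) (out : Int) : Decidable (Spec_maxSymNotes notes out) := by unfold Spec_maxSymNotes; infer_instance

-- ===== CLAIM (what is proved, stated in full; the proofs are below) =====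
def Claim_equal_maxSymNotes : Prop := ∀ (notes : List (Int × Int × Int)), Dom_maxSymNotes notes → Spec_maxSymNotes notes (maxSymNotes notes)

-- ===== LEMMAS AND PROOFS =====

-- reference: the largest value the running counter reaches, starting from curr
def pvH (curr : Int) (l : List (Int × Int × Int)) : Int :=
  match l with
  | [] => curr
  | n :: t => if n.2.2 = 0 then pvH (curr + 1) t else max curr (pvH 0 t)

theorem pvH_ge (curr : Int) (l : List (Int × Int × Int)) : curr ≤ pvH curr l := by
  induction l generalizing curr with
  | nil => simp [pvH]
  | cons n t ih =>
    simp only [pvH]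
    split
    · exact le_trans (by omega) (ih (curr + 1))
    · exact le_max_left _ _

theorem pvA_foldl (l : List (Int × Int × Int)) (curr mx : Int)
    (h0 : 0 ≤ curr) (h1 : curr ≤ mx) :
    (l.foldl
      (fun (st : Int × Int) note =>
        if note.2.2 = 0 then
          let c := st.1 + 1
          (c, if c > st.2 then c else st.2)
        else
          (0, st.2))
      (curr, mx)).2 = max mx (pvH curr l) := by
  induction l generalizing curr mx with
  | nil => simp [pvH, max_eq_left h1]
  | cons n t ih =>
    simp only [List.foldl_cons, pvH]
    split
    · have hstep : (if curr + 1 > mx then curr + 1 else mx) = max mx (curr + 1) := by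
        simp [max_def]; omega
      rw [hstep, ih (curr + 1) _ (by omega) (le_max_right _ _)]
      have := pvH_ge (curr + 1) t
      have hmerge : max (max mx (curr + 1)) (pvH (curr + 1) t) = max mx (pvH (curr + 1) t) := by
        omega
      rw [hmerge]
    · rw [ih 0 mx le_rfl (le_trans h0 h1)]
      have := pvH_ge (0 : Int) t
      omega

-- consuming the leading zero run advances pvH
theorem pvH_drop (t : List (Int × Int × Int)) (curr : Int) :
    pvH curr t = pvH (curr + (pvCountZeros t : Int)) (t.drop (pvCountZeros t)) := by
  induction t generalizing curr with
  | nil => simp [pvCountZeros]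
  | cons n r ih =>
    by_cases hz : n.2.2 = 0
    · have hc : pvCountZeros (n :: r) = pvCountZeros r + 1 := by
        simp [pvCountZeros, hz]; omega
      rw [hc, List.drop_succ_cons]
      simp only [pvH, if_pos hz]
      rw [ih (curr + 1)]
      congr 1
      push_cast; ring
    · simp [pvCountZeros, hz]

-- after dropping the leading zero run, the head (if any) is nonzero
theorem pvDrop_head (t : List (Int × Int × Int)) :
    t.drop (pvCountZeros t) = [] ∨
      ∃ m r, t.drop (pvCountZeros t) = m :: r ∧ m.2.2 ≠ 0 := by
  induction t with
  | nil => left; rfl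
  | cons n r ih =>
    by_cases hz : n.2.2 = 0
    · have hc : pvCountZeros (n :: r) = pvCountZeros r + 1 := by
        simp [pvCountZeros, hz]; omega
      rw [hc, List.drop_succ_cons]
      exact ih
    · right; exact ⟨n, r, by simp [pvCountZeros, hz], hz⟩

theorem pvScan_eq (l : List (Int × Int × Int)) (best : Int) (hb : 0 ≤ best) :
    pvScanRuns l best = max best (pvH 0 l) := by
  induction hn : l.length using Nat.strong_induction_on generalizing l best with
  | _ k ih =>
  match l with
  | [] => rw [pvScanRuns]; simp [pvH, max_eq_left hb]
  | n :: t =>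
    by_cases hz : n.2.2 = 0
    · have hc0 : (0 : Int) ≤ 1 + (pvCountZeros t : Int) := by positivity
      have hlen : (t.drop (pvCountZeros t)).length < k := by
        subst hn; simp only [List.length_cons, List.length_drop]; omega
      have hbp : (0:Int) ≤ (if 1 + (pvCountZeros t : Int) > best then 1 + (pvCountZeros t : Int) else best) := by
        split <;> omega
      rw [pvScanRuns]
      simp only [hz, if_true]
      rw [ih _ hlen _ _ hbp rfl]
      have hH : pvH 0 (n :: t) = max (1 + (pvCountZeros t : Int)) (pvH 0 (t.drop (pvCountZeros t))) := by
        simp only [pvH, if_pos hz]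
        rw [show (0:Int) + 1 = 1 from rfl, pvH_drop t 1]
        rcases pvDrop_head t with h | ⟨m, r, hmr, hm⟩
        · simp [h, pvH]; omega
        · rw [hmr]
          rw [show pvH (1 + (pvCountZeros t : Int)) (m :: r) = max (1 + (pvCountZeros t : Int)) (pvH 0 r) from by simp [pvH, hm]]
          rw [show pvH 0 (m :: r) = max 0 (pvH 0 r) from by simp [pvH, hm]]
          have := pvH_ge (0 : Int) r
          have h1 : (0:Int) ≤ (pvCountZeros t : Int) := by positivity
          omega
      rw [hH]
      have hP := pvH_ge (0 : Int) (t.drop (pvCountZeros t))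
      simp only [max_def]
      split <;> split <;> split <;> omega
    · have hlen : t.length < k := by subst hn; simp
      rw [pvScanRuns]
      simp only [if_neg hz]
      rw [ih _ hlen _ _ hb rfl]
      have : pvH 0 (n :: t) = pvH 0 t := by
        simp only [pvH, if_neg hz]
        have := pvH_ge (0 : Int) t
        omega
      rw [this]

-- ===== VERDICT (by name: the statement is the Claim_ definition above) =====
theorem maxSymNotes_spec : Claim_equal_maxSymNotes := by
  intro notes _
  unfold Spec_maxSymNotes maxSymNotes maxSymNotes_alt
  rw [pvA_foldl notes 0 0 le_rfl le_rfl, pvScan_eq notes 0 le_rfl]
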